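-- pv_equiv track=rewrite | github.com/14BNB92/itd_reg_bot | handlers/mail.py | are_grades_correct
-- ===== SOURCE A (Python) =====
-- def are_grades_correct(grades):
--     symbols = '1234567890'
--     if grades[0] not in symbols or grades[-1] not in symbols:
--         return False
--     for symbol in grades:
--         if symbol not in f'{symbols}-':
--             return False
--     if grades.count('-') > 1:
--         return False
--     if grades.count('-') == 0:
--         if int(grades) <= 11:
--             return True
--         else:
--             return False
--     else:
--         grades = [int(x) for x in grades.split('-')]
--         if (grades[0] < grades[1]) and (grades[0] <= 11) and (grades[1] <= 11):
--             return True
--         else: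
--             return False
-- ===== SOURCE B (Python) =====
-- def are_grades_correct(grades):
--     lo = None      # left bound once a '-' has been consumed
--     seg = []       # characters of the current numeric segment
--     for ch in grades:
--         if ch == '-':
--             if lo is not None or not seg:
--                 return False
--             lo = int(''.join(seg))
--             seg = []
--         elif not '0' <= ch <= '9':
--             return False
--         else:
--             seg.append(ch)
--     if not seg:
--         return False
--     hi = int(''.join(seg))
--     if lo is None:
--         return hi <= 11
--     return lo < hi and lo <= 11 and hi <= 11
-- ===== Notes on version B (the rewrite author's own statement) =====
-- stated objective: alternative
-- what changed: Replaced A's staged passes (two boundary probes, a char-membership loop, two dash-count passes, split plus a list comprehension of int) with a single left-to-right state machine that accumulates the current numeric segment and closes it at each dash and at the end.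
import Mathlib
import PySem

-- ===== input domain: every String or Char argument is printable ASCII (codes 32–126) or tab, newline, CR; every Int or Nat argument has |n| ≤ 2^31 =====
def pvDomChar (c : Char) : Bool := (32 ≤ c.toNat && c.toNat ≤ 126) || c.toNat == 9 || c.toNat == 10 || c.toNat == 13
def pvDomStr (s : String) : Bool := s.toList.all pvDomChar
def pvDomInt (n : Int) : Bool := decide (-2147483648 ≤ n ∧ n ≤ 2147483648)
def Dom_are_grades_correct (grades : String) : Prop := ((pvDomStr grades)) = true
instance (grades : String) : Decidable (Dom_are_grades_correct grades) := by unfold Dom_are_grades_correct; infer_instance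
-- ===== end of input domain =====

-- B replaces A's staged passes (two boundary probes, a char-membership loop, two dash-count
-- passes, split plus int on the parts) by a single left-to-right state machine that closes
-- a numeric segment at each dash and at the end; same return value on nonempty strings.

-- ===== PORT A =====
def are_grades_correct (grades : String) : Bool :=
  let symbols : List Char := "1234567890".toList
  match PySem.List.pyGet? grades.toList 0, PySem.List.pyGet? grades.toList (-1) with
  | some c0, some cn =>
    if !(symbols.contains c0) || !(symbols.contains cn) then false
    else if grades.toList.any (fun c => !(("1234567890-".toList).contains c)) then false
    else if grades.toList.count '-' > 1 then false
    else if grades.toList.count '-' == 0 then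
      -- int(grades): `none` is the ValueError guard (unreachable after the digit checks)
      match PySem.Int.ofChars? grades.toList with
      | some n => if n ≤ 11 then true else false
      | none => false
    else
      match PySem.List.pyGet? ((PySem.Chars.splitOn grades.toList ['-']).map PySem.Int.ofChars?) 0,
            PySem.List.pyGet? ((PySem.Chars.splitOn grades.toList ['-']).map PySem.Int.ofChars?) 1 with
      | some (some a), some (some b) =>
        if a < b ∧ a ≤ 11 ∧ b ≤ 11 then true else false
      | _, _ => false
  | _, _ => false  -- IndexError on the empty string: excluded by Pre_

-- ===== PORT B =====
-- the for-loop over the characters, with state (lo = left bound once '-' was consumed, seg =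
-- chars of the current segment) and the code after the loop at the [] case
def agcLoop : List Char → Option Int → List Char → Bool
  | [], lo, seg =>
    if seg.isEmpty then false
    else
      -- int(''.join(seg)): `none` is the ValueError guard (unreachable: seg is nonempty digits)
      match PySem.Int.ofChars? seg with
      | none => false
      | some hi =>
        match lo with
        | none => decide (hi ≤ 11)
        | some a => decide (a < hi ∧ a ≤ 11 ∧ hi ≤ 11)
  | c :: rest, lo, seg =>
    if c == '-' then
      if lo.isSome || seg.isEmpty then false
      else
        match PySem.Int.ofChars? seg with  -- int() guard, unreachable
        | none => false
        | some v => agcLoop rest (some v) []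
    else if !(decide ('0' ≤ c) && decide (c ≤ '9')) then false
    else agcLoop rest lo (seg ++ [c])

def are_grades_correct_alt (grades : String) : Bool :=
  agcLoop grades.toList none []

-- ===== PRECONDITION & SPEC =====
-- Pre_ excludes only the empty string, on which A raises IndexError at grades[0].
def Pre_are_grades_correct (grades : String) : Prop := grades.toList ≠ []
instance (grades : String) : Decidable (Pre_are_grades_correct grades) := by
  unfold Pre_are_grades_correct; infer_instance
def pvWitness_are_grades_correct : String := "7-11"

def Spec_are_grades_correct (grades : String) (out : Bool) : Prop := out = are_grades_correct_alt grades
instance (grades : String) (out : Bool) : Decidable (Spec_are_grades_correct grades out) := by unfold Spec_are_grades_correct; infer_instance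

-- ===== CLAIM (what is proved, stated in full; the proofs are below) =====
def Claim_equal_are_grades_correct : Prop := ∀ (grades : String), Dom_are_grades_correct grades → Pre_are_grades_correct grades → Spec_are_grades_correct grades (are_grades_correct grades)

-- ===== LEMMAS AND PROOFS =====

lemma contains_digits (c : Char) :
    ("1234567890".toList).contains c = PySem.Chars.isdigit c := by
  show ['1','2','3','4','5','6','7','8','9','0'].contains c = _
  rw [Bool.eq_iff_iff]
  simp only [List.contains_eq_mem, List.mem_cons, List.not_mem_nil, or_false, decide_eq_true_eq,
    PySem.Chars.isdigit, Char.ext_iff, Char.le_def, UInt32.le_iff_toNat_le, UInt32.ext_iff,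
    Bool.and_eq_true,
    show ('0':Char).val.toNat = 48 from rfl, show ('1':Char).val.toNat = 49 from rfl,
    show ('2':Char).val.toNat = 50 from rfl, show ('3':Char).val.toNat = 51 from rfl,
    show ('4':Char).val.toNat = 52 from rfl, show ('5':Char).val.toNat = 53 from rfl,
    show ('6':Char).val.toNat = 54 from rfl, show ('7':Char).val.toNat = 55 from rfl,
    show ('8':Char).val.toNat = 56 from rfl, show ('9':Char).val.toNat = 57 from rfl]
  omega

lemma contains_digits_dash (c : Char) :
    ("1234567890-".toList).contains c = (PySem.Chars.isdigit c || c == '-') := by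
  show ['1','2','3','4','5','6','7','8','9','0','-'].contains c = _
  rw [Bool.eq_iff_iff]
  simp only [List.contains_eq_mem, List.mem_cons, List.not_mem_nil, or_false, decide_eq_true_eq,
    PySem.Chars.isdigit, Char.ext_iff, Char.le_def, UInt32.le_iff_toNat_le, UInt32.ext_iff,
    Bool.and_eq_true, Bool.or_eq_true, beq_iff_eq,
    show ('0':Char).val.toNat = 48 from rfl, show ('1':Char).val.toNat = 49 from rfl,
    show ('2':Char).val.toNat = 50 from rfl, show ('3':Char).val.toNat = 51 from rfl,
    show ('4':Char).val.toNat = 52 from rfl, show ('5':Char).val.toNat = 53 from rfl,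
    show ('6':Char).val.toNat = 54 from rfl, show ('7':Char).val.toNat = 55 from rfl,
    show ('8':Char).val.toNat = 56 from rfl, show ('9':Char).val.toNat = 57 from rfl,
    show ('-':Char).val.toNat = 45 from rfl]
  omega

lemma splitOn_go_no_dash (l : List Char) : ∀ (fuel : Nat) (cur : List Char) (acc : List (List Char)),
    '-' ∉ l → l.length ≤ fuel →
    PySem.Chars.splitOn.go ['-'] fuel l cur acc = ((cur.reverse ++ l) :: acc).reverse := by
  induction l with
  | nil =>
    intro fuel cur acc _ _
    cases fuel <;> simp [PySem.Chars.splitOn.go]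
  | cons c rest ih =>
    intro fuel cur acc hl hf
    obtain ⟨fuel, rfl⟩ : ∃ f, fuel = f + 1 := ⟨fuel - 1, by simp at hf; omega⟩
    rw [PySem.Chars.splitOn.go]
    have hpre : List.isPrefixOf ['-'] (c :: rest) = false := by
      simp [List.isPrefixOf]
      intro h; subst h; exact hl List.mem_cons_self
    simp only [hpre, Bool.false_eq_true, if_false]
    rw [ih fuel (c :: cur) acc (fun h => hl (List.mem_cons_of_mem _ h)) (by simpa using hf)]
    simp

lemma splitOn_go_dash (xs : List Char) : ∀ (ys cur : List Char) (acc : List (List Char)) (fuel : Nat),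
    '-' ∉ xs → xs.length + 1 + ys.length ≤ fuel →
    PySem.Chars.splitOn.go ['-'] fuel (xs ++ '-' :: ys) cur acc
      = PySem.Chars.splitOn.go ['-'] (fuel - (xs.length + 1)) ys [] ((cur.reverse ++ xs) :: acc) := by
  induction xs with
  | nil =>
    intro ys cur acc fuel _hx hf
    obtain ⟨fuel, rfl⟩ : ∃ f, fuel = f + 1 := ⟨fuel - 1, by simp at hf; omega⟩
    rw [List.nil_append, PySem.Chars.splitOn.go]
    have hpre : List.isPrefixOf ['-'] ('-' :: ys) = true := by simp [List.isPrefixOf]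
    simp [hpre]
  | cons c rest ih =>
    intro ys cur acc fuel hx hf
    obtain ⟨fuel, rfl⟩ : ∃ f, fuel = f + 1 := ⟨fuel - 1, by simp at hf; omega⟩
    rw [List.cons_append, PySem.Chars.splitOn.go]
    have hpre : List.isPrefixOf ['-'] (c :: (rest ++ '-' :: ys)) = false := by
      simp [List.isPrefixOf]
      intro h; subst h; exact hx List.mem_cons_self
    simp only [hpre, Bool.false_eq_true, if_false]
    rw [ih ys (c :: cur) acc fuel (fun h => hx (List.mem_cons_of_mem _ h)) (by simp at hf ⊢; omega)]
    simp only [List.length_cons, List.reverse_cons, List.append_assoc, List.cons_append,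
      List.nil_append]
    congr 1
    omega

lemma splitOn_one_dash (xs ys : List Char) (hx : '-' ∉ xs) (hy : '-' ∉ ys) :
    PySem.Chars.splitOn (xs ++ '-' :: ys) ['-'] = [xs, ys] := by
  rw [PySem.Chars.splitOn]
  rw [splitOn_go_dash xs ys [] [] _ hx (by simp; omega)]
  rw [splitOn_go_no_dash ys _ [] _ hy (by simp)]
  simp

lemma pyGet?_zero (gs : List Char) : PySem.List.pyGet? gs 0 = gs.head? := by
  cases gs with
  | nil => rfl
  | cons c rest => simp [PySem.List.pyGet?, PySem.List.pyIdx?]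

lemma pyGet?_neg_one (gs : List Char) : PySem.List.pyGet? gs (-1) = gs.getLast? := by
  cases gs with
  | nil => rfl
  | cons c rest =>
    simp only [PySem.List.pyGet?, PySem.List.pyIdx?]
    norm_num
    rw [List.getLast?_eq_getElem?]
    simp

-- B-side: the digit test in agcLoop is PySem.Chars.isdigit
lemma agcLoop_digit_test (c : Char) :
    (decide ('0' ≤ c) && decide (c ≤ '9')) = PySem.Chars.isdigit c := rfl

-- B-side: a dash-free all-digit block is swallowed into seg
lemma agcLoop_digits (xs : List Char) : ∀ (rest : List Char) (lo : Option Int) (seg : List Char),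
    xs.all PySem.Chars.isdigit →
    agcLoop (xs ++ rest) lo seg = agcLoop rest lo (seg ++ xs) := by
  induction xs with
  | nil => intro rest lo seg _; simp
  | cons c xs ih =>
    intro rest lo seg hall
    simp only [List.all_cons, Bool.and_eq_true] at hall
    obtain ⟨hc, hxs⟩ := hall
    have hcd : (c == '-') = false := by
      rw [beq_eq_false_iff_ne]; intro h; subst h; exact absurd hc (by decide)
    rw [List.cons_append, agcLoop]
    simp only [hcd, Bool.false_eq_true, if_false, agcLoop_digit_test, hc, Bool.not_true,
      Bool.false_eq_true, if_false]
    rw [ih rest lo (seg ++ [c]) hxs]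
    simp

-- B-side: a dash-free block with a non-digit character kills the run
lemma agcLoop_nondigit (xs : List Char) : ∀ (rest : List Char) (lo : Option Int) (seg : List Char),
    '-' ∉ xs → xs.all PySem.Chars.isdigit = false →
    agcLoop (xs ++ rest) lo seg = false := by
  induction xs with
  | nil => intro _ _ _ _ h; simp at h
  | cons c xs ih =>
    intro rest lo seg hnd hall
    have hcd : (c == '-') = false := by
      rw [beq_eq_false_iff_ne]; intro h; subst h; exact hnd List.mem_cons_self
    rw [List.cons_append, agcLoop]
    simp only [hcd, Bool.false_eq_true, if_false, agcLoop_digit_test]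
    by_cases hc : PySem.Chars.isdigit c = true
    · simp only [hc, Bool.not_true, Bool.false_eq_true, if_false]
      apply ih
      · intro h; exact hnd (List.mem_cons_of_mem _ h)
      · simpa [hc] using hall
    · have hc' : PySem.Chars.isdigit c = false := by simpa using hc
      simp [hc']

-- B-side: a second dash with lo already set kills the run
lemma agcLoop_second_dash (ys : List Char) : ∀ (a : Int) (seg : List Char),
    '-' ∈ ys → agcLoop ys (some a) seg = false := by
  induction ys with
  | nil => intro _ _ h; simp at h
  | cons c ys ih =>
    intro a seg hm
    rw [agcLoop]
    cases hcd : (c == '-') with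
    | true => simp
    | false =>
      simp only [Bool.false_eq_true, if_false]
      have hm' : '-' ∈ ys := by
        rcases List.mem_cons.mp hm with h | h
        · exact absurd h.symm (by simpa using (beq_eq_false_iff_ne.mp hcd))
        · exact h
      cases hdig : (!(decide ('0' ≤ c) && decide (c ≤ '9'))) with
      | true => simp
      | false => simp only [Bool.false_eq_true, if_false]; exact ih a _ hm'

-- ===== VERDICT (by name: the statement is the Claim_ definition above) =====
theorem are_grades_correct_spec : Claim_equal_are_grades_correct := by
  intro grades _ hpre
  unfold Spec_are_grades_correct are_grades_correct_alt are_grades_correct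
  unfold Pre_are_grades_correct at hpre
  rw [pyGet?_zero, pyGet?_neg_one]
  generalize grades.toList = gs at *
  have hh : gs.head? = some (gs.head hpre) := List.head?_eq_some_head hpre
  have hl : gs.getLast? = some (gs.getLast hpre) := List.getLast?_eq_some_getLast hpre
  rw [hh, hl]
  simp only []
  by_cases hmem : '-' ∈ gs
  · obtain ⟨xs, t, hgs, hxs⟩ := List.eq_append_cons_of_mem hmem
    have hcnt : gs.count '-' = t.count '-' + 1 := by
      conv_lhs => rw [hgs]
      rw [List.count_append, List.count_eq_zero.mpr hxs]
      simp
    by_cases hxall : xs.all PySem.Chars.isdigit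
    · by_cases hx0 : xs = []
      · -- the dash is first: A sees grades[0] = '-', B closes an empty segment
        have hhead : gs.head hpre = '-' := by
          have h9 : gs.head? = some '-' := by rw [hgs, hx0]; rfl
          rw [hh] at h9; exact (Option.some.inj h9)
        have hB : agcLoop gs none [] = false := by
          rw [hgs, hx0, List.nil_append, agcLoop]
          simp
        rw [hB, hhead, contains_digits]
        simp [show PySem.Chars.isdigit '-' = false from by decide]
      · -- nonempty all-digit left part: B swallows it into seg and reaches the dash
        have hBstep : agcLoop gs none [] =
            (match PySem.Int.ofChars? xs with
             | none => false
             | some v => agcLoop t (some v) []) := by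
          rw [hgs, agcLoop_digits xs ('-' :: t) none [] hxall, List.nil_append, agcLoop]
          simp [hx0]
        rw [hBstep]
        obtain ⟨x, xs', hxx⟩ := List.exists_cons_of_ne_nil hx0
        have hhead : gs.head hpre = x := by
          have h9 : gs.head? = some x := by rw [hgs, hxx]; rfl
          rw [hh] at h9; exact (Option.some.inj h9)
        have hcx : PySem.Chars.isdigit x = true :=
          List.all_eq_true.mp hxall _ (by rw [hxx]; exact List.mem_cons_self)
        by_cases hyt : '-' ∈ t
        · -- two or more dashes: both sides are false
          have hB : (match PySem.Int.ofChars? xs with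
             | none => false
             | some v => agcLoop t (some v) []) = false := by
            cases PySem.Int.ofChars? xs with
            | none => rfl
            | some v => exact agcLoop_second_dash t v [] hyt
          rw [hB, hhead, contains_digits, hcx]
          cases hb2 : ("1234567890".toList).contains (gs.getLast hpre) with
          | false => simp only [Bool.not_false, Bool.not_true, Bool.or_true, if_true]
          | true =>
            cases hb3 : gs.any (fun c => !(("1234567890-".toList).contains c)) with
            | true => simp
            | false =>
              simp only [Bool.not_true, Bool.or_self, Bool.false_eq_true, if_false, hcnt]
              rw [if_pos (by have := List.count_pos_iff.mpr hyt; omega)]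
        · -- exactly one dash
          have hcnt1 : gs.count '-' = 1 := by
            rw [hcnt, List.count_eq_zero.mpr hyt]
          by_cases htall : t.all PySem.Chars.isdigit
          · by_cases ht0 : t = []
            · -- the dash is last: A sees grades[-1] = '-', B closes an empty final segment
              have hlast : gs.getLast hpre = '-' := by
                have h9 : gs.getLast? = some '-' := by rw [hgs, ht0]; simp
                rw [hl] at h9; exact (Option.some.inj h9)
              have hB : (match PySem.Int.ofChars? xs with
                 | none => false
                 | some v => agcLoop t (some v) []) = false := by
                cases PySem.Int.ofChars? xs with
                | none => rfl
                | some v => rw [ht0]; rfl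
              rw [hB, hlast, contains_digits]
              simp
            · -- both parts nonempty all-digit: the numeric tests coincide
              obtain ⟨u, z, huz⟩ := (List.eq_nil_or_concat t).resolve_left ht0
              have hlast : gs.getLast hpre = z := by
                have h9 : gs.getLast? = some z := by
                  rw [hgs, huz]
                  rw [List.getLast?_append_of_ne_nil _ (by simp)]
                  rw [List.concat_eq_append, show ('-' :: (u ++ [z])) = ('-' :: u) ++ [z] from rfl]
                  exact List.getLast?_concat
                rw [hl] at h9; exact (Option.some.inj h9)
              have hcz : PySem.Chars.isdigit z = true :=
                List.all_eq_true.mp htall _ (by rw [huz]; simp)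
              have hany : (gs.any fun c => !(("1234567890-".toList).contains c)) = false := by
                simp only [List.any_eq_false]
                intro c hc
                rw [contains_digits_dash]
                rw [hgs] at hc
                rcases List.mem_append.mp hc with hcl | hcr
                · simp [List.all_eq_true.mp hxall _ hcl]
                · rcases List.mem_cons.mp hcr with rfl | hct
                  · simp
                  · simp [List.all_eq_true.mp htall _ hct]
              have hsplit : PySem.Chars.splitOn gs ['-'] = [xs, t] := by
                rw [hgs]; exact splitOn_one_dash _ _ hxs hyt
              have hB : (match PySem.Int.ofChars? xs with
                 | none => false
                 | some v => agcLoop t (some v) []) =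
                  (match PySem.Int.ofChars? xs, PySem.Int.ofChars? t with
                   | some a, some b => decide (a < b ∧ a ≤ 11 ∧ b ≤ 11)
                   | _, _ => false) := by
                cases PySem.Int.ofChars? xs with
                | none => rfl
                | some a =>
                  simp only []
                  rw [← List.append_nil t, agcLoop_digits t [] (some a) [] htall,
                    List.nil_append, List.append_nil]
                  have hne : t.isEmpty = false := by simpa [List.isEmpty_eq_false_iff] using ht0
                  simp only [agcLoop, hne, Bool.false_eq_true, if_false]
                  cases PySem.Int.ofChars? t with
                  | none => rfl
                  | some b => rfl
              rw [hB, hhead, hlast, contains_digits, contains_digits, hcx, hcz]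
              simp only [hany, Bool.not_true, Bool.or_self, Bool.false_eq_true, if_false,
                hcnt1, hsplit, List.map_cons, List.map_nil]
              rw [if_neg (by omega : ¬ (1:Nat) > 1), if_neg (by decide : ¬ ((1:Nat) == 0) = true)]
              have hp0 : PySem.List.pyGet? [PySem.Int.ofChars? xs, PySem.Int.ofChars? t] 0
                  = some (PySem.Int.ofChars? xs) := by simp [PySem.List.pyGet?, PySem.List.pyIdx?]
              have hp1 : PySem.List.pyGet? [PySem.Int.ofChars? xs, PySem.Int.ofChars? t] 1
                  = some (PySem.Int.ofChars? t) := by simp [PySem.List.pyGet?, PySem.List.pyIdx?]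
              rw [hp0, hp1]
              cases PySem.Int.ofChars? xs with
              | none => rfl
              | some a =>
                cases PySem.Int.ofChars? t with
                | none => rfl
                | some b => by_cases h : a < b ∧ a ≤ 11 ∧ b ≤ 11 <;> simp [h]
          · -- a non-digit character in the (dash-free) right part: both sides false
            have hB : (match PySem.Int.ofChars? xs with
               | none => false
               | some v => agcLoop t (some v) []) = false := by
              cases PySem.Int.ofChars? xs with
              | none => rfl
              | some v =>
                rw [← List.append_nil t]
                exact agcLoop_nondigit t [] (some v) [] hyt (Bool.eq_false_iff.mpr htall)
            obtain ⟨c, hc, hcd⟩ := List.all_eq_false.mp (Bool.eq_false_iff.mpr htall)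
            rw [hB, hhead, contains_digits, hcx]
            cases hb2 : ("1234567890".toList).contains (gs.getLast hpre) with
            | false => simp only [Bool.not_true, Bool.not_false, Bool.or_true, if_true]
            | true =>
              have hany : (gs.any fun c => !(("1234567890-".toList).contains c)) = true := by
                simp only [List.any_eq_true]
                refine ⟨c, by rw [hgs]; exact List.mem_append_right _ (List.mem_cons_of_mem _ hc), ?_⟩
                rw [contains_digits_dash]
                have hne : c ≠ '-' := fun h => hyt (h ▸ hc)
                simp [hcd, hne]
              simp only [hany, Bool.not_true, Bool.or_self, Bool.false_eq_true, if_false, if_true]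
    · -- a non-digit character in the (dash-free) left part: both sides false
      have hx0 : xs ≠ [] := by rintro rfl; exact hxall (by simp)
      have hB : agcLoop gs none [] = false := by
        rw [hgs]
        exact agcLoop_nondigit xs ('-' :: t) none [] hxs (Bool.eq_false_iff.mpr hxall)
      obtain ⟨c, hc, hcd⟩ := List.all_eq_false.mp (Bool.eq_false_iff.mpr hxall)
      rw [hB]
      cases hb1 : ("1234567890".toList).contains (gs.head hpre) with
      | false => simp only [Bool.not_false, Bool.true_or, if_true]
      | true =>
        cases hb2 : ("1234567890".toList).contains (gs.getLast hpre) with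
        | false => simp only [Bool.not_true, Bool.not_false, Bool.or_true, if_true]
        | true =>
          have hany : (gs.any fun c => !(("1234567890-".toList).contains c)) = true := by
            simp only [List.any_eq_true]
            refine ⟨c, by rw [hgs]; exact List.mem_append_left _ hc, ?_⟩
            rw [contains_digits_dash]
            have hne : c ≠ '-' := fun h => hxs (h ▸ hc)
            simp [hcd, hne]
          simp only [hany, Bool.not_true, Bool.or_self, Bool.false_eq_true, if_false, if_true]
  · -- no dash in gs
    have hcount : gs.count '-' = 0 := List.count_eq_zero.mpr hmem
    by_cases hall : gs.all PySem.Chars.isdigit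
    · have h1 : ("1234567890".toList).contains (gs.head hpre) = true := by
        rw [contains_digits]; exact (List.all_eq_true.mp hall) _ (List.head_mem hpre)
      have h2 : ("1234567890".toList).contains (gs.getLast hpre) = true := by
        rw [contains_digits]; exact (List.all_eq_true.mp hall) _ (List.getLast_mem hpre)
      have hany : gs.any (fun c => !(("1234567890-".toList).contains c)) = false := by
        simp only [List.any_eq_false]
        intro c hc
        rw [contains_digits_dash]
        simp [(List.all_eq_true.mp hall) c hc]
      have hB : agcLoop gs none [] =
          (match PySem.Int.ofChars? gs with
           | none => false
           | some n => decide (n ≤ 11)) := by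
        rw [← List.append_nil gs, agcLoop_digits gs [] none [] hall, List.nil_append,
          List.append_nil, agcLoop]
        rw [if_neg (by simpa [List.isEmpty_eq_false_iff] using hpre)]
      rw [hB]
      simp only [h1, h2, hany, hcount, Bool.not_true, Bool.or_self, Bool.false_eq_true,
        if_false, gt_iff_lt, beq_self_eq_true, if_true]
      cases PySem.Int.ofChars? gs with
      | none => simp
      | some n => by_cases h : n ≤ 11 <;> simp [h]
    · have hB : agcLoop gs none [] = false := by
        rw [← List.append_nil gs]
        exact agcLoop_nondigit gs [] none [] hmem (Bool.eq_false_iff.mpr hall)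
      obtain ⟨c, hc, hcd⟩ := List.all_eq_false.mp (Bool.eq_false_iff.mpr hall)
      rw [hB, contains_digits, contains_digits]
      cases hb1 : PySem.Chars.isdigit (gs.head hpre) with
      | false => simp only [Bool.not_false, Bool.true_or, if_true]
      | true =>
        cases hb2 : PySem.Chars.isdigit (gs.getLast hpre) with
        | false => simp only [Bool.not_true, Bool.not_false, Bool.or_true, if_true]
        | true =>
          have hany : gs.any (fun c => !(("1234567890-".toList).contains c)) = true := by
            simp only [List.any_eq_true]
            refine ⟨c, hc, ?_⟩
            rw [contains_digits_dash]
            have hne : c ≠ '-' := fun h => hmem (h ▸ hc)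
            simp [hcd, hne]
          simp only [hany, Bool.not_true, Bool.or_self, Bool.false_eq_true, if_false, if_true]
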